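-- pv_equiv track=rewrite | github.com/mapleleavessssssss-wq/vivado-mcp | src/vivado_mcp/analysis/io_parser.py | _detect_column_boundaries
-- ===== SOURCE A (Python) =====
-- def _detect_column_boundaries(separator_line: str) -> list[tuple[int, int]]:
--     """从分隔线中检测列边界位置。
--
--     分隔线格式如：+-------+-------+-------+
--     每个 '+' 是列分隔符，两个 '+' 之间是一列的范围。
--
--     Returns:
--         列边界列表，每项为 (start, end) 位置索引。
--     """
--     boundaries: list[tuple[int, int]] = []
--     plus_positions = [i for i, ch in enumerate(separator_line) if ch == "+"]
--
--     for i in range(len(plus_positions) - 1):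
--         # 列内容在两个 '+' 之间（不含 '+'）
--         start = plus_positions[i] + 1
--         end = plus_positions[i + 1]
--         boundaries.append((start, end))
--
--     return boundaries
-- ===== SOURCE B (Python) =====
-- def _detect_column_boundaries(separator_line: str) -> list[tuple[int, int]]:
--     """Single pass: emit a boundary each time a '+' follows a previously seen '+'."""
--     boundaries: list[tuple[int, int]] = []
--     prev = -1
--     for i, ch in enumerate(separator_line):
--         if ch == "+":
--             if prev >= 0:
--                 boundaries.append((prev + 1, i))
--             prev = i
--     return boundaries
-- ===== Notes on version B (the rewrite author's own statement) =====
-- stated objective: simpler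
-- what changed: Replaces the two-phase version (materialize the list of all separator positions, then a second indexed loop pairing adjacent positions) by one scan that keeps only the previous separator index and emits each boundary inline.
import Mathlib
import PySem

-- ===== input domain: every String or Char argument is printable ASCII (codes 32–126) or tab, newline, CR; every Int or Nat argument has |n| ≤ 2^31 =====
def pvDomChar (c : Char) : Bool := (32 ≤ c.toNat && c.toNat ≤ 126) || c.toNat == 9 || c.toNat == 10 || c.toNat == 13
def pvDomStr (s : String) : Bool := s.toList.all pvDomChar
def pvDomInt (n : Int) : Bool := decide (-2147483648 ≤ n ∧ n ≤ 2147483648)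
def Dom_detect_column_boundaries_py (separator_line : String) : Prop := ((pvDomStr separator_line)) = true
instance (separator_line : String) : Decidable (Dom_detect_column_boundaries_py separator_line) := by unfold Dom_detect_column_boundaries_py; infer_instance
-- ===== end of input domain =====

-- B replaces A's two-phase plan (collect all '+' positions, then pair adjacent ones by index)
-- by a single scan that keeps only the previous '+' index (objective: simpler).

-- ===== PORT A =====
def detect_column_boundaries_py (separator_line : String) : List (Int × Int) :=
  let plus_positions : List Int :=
    (PySem.List.enumerate separator_line.toList 0).foldl
      (fun acc p => if p.2 = '+' then acc ++ [p.1] else acc) []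
  (PySem.List.pyRange 0 ((plus_positions.length : Int) - 1) 1).foldl
    (fun boundaries i =>
      boundaries ++ [(PySem.List.pyGetD plus_positions i 0 + 1,
                      PySem.List.pyGetD plus_positions (i + 1) 0)]) []

-- ===== PORT B =====
-- the for-loop of Source B as structural recursion over the enumerated characters;
-- state = (prev, boundaries), prev = -1 is Source B's sentinel
def pvAltGo : List (Int × Char) → Int → List (Int × Int) → List (Int × Int)
  | [], _, boundaries => boundaries
  | (i, ch) :: rest, prev, boundaries =>
    if ch = '+' then
      pvAltGo rest i (if 0 ≤ prev then boundaries ++ [(prev + 1, i)] else boundaries)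
    else
      pvAltGo rest prev boundaries

def detect_column_boundaries_py_alt (separator_line : String) : List (Int × Int) :=
  pvAltGo (PySem.List.enumerate separator_line.toList 0) (-1) []

-- ===== PRECONDITION & SPEC =====
def Spec_detect_column_boundaries_py (separator_line : String) (out : List (Int × Int)) : Prop := out = detect_column_boundaries_py_alt separator_line
instance (separator_line : String) (out : List (Int × Int)) : Decidable (Spec_detect_column_boundaries_py separator_line out) := by unfold Spec_detect_column_boundaries_py; infer_instance

-- ===== CLAIM (what is proved, stated in full; the proofs are below) =====
def Claim_equal_detect_column_boundaries_py : Prop := ∀ (separator_line : String), Dom_detect_column_boundaries_py separator_line → Spec_detect_column_boundaries_py separator_line (detect_column_boundaries_py separator_line)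

-- ===== LEMMAS AND PROOFS =====

-- positions of '+' in cs, indices starting at s
def pvPluses : List Char → Int → List Int
  | [], _ => []
  | c :: rest, s => if c = '+' then s :: pvPluses rest (s + 1) else pvPluses rest (s + 1)

-- adjacent pairs (p+1, q) of a position list
def pvPairs : List Int → List (Int × Int)
  | x :: y :: rest => (x + 1, y) :: pvPairs (y :: rest)
  | _ => []

theorem pvAltGo_eq (cs : List Char) (s prev : Int) (acc : List (Int × Int))
    (hs : 0 ≤ s) :
    pvAltGo (PySem.List.enumerate cs s) prev acc =
      acc ++ (if 0 ≤ prev then pvPairs (prev :: pvPluses cs s) else pvPairs (pvPluses cs s)) := by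
  induction cs generalizing s prev acc with
  | nil => simp [PySem.List.enumerate_nil, pvAltGo, pvPluses, pvPairs]
  | cons c rest ih =>
    rw [PySem.List.enumerate_cons]
    by_cases hc : c = '+'
    · simp only [pvAltGo, hc, if_true, pvPluses]
      rw [ih (s + 1) s _ (by omega)]
      simp only [hs, if_true]
      by_cases hp : 0 ≤ prev
      · simp [hp, pvPairs, List.append_assoc]
      · simp [hp]
    · simp only [pvAltGo, hc, if_false, pvPluses]
      rw [ih (s + 1) prev acc (by omega)]

theorem pvCollect_eq (cs : List Char) (s : Int) (acc : List Int) :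
    (PySem.List.enumerate cs s).foldl
      (fun acc p => if p.2 = '+' then acc ++ [p.1] else acc) acc = acc ++ pvPluses cs s := by
  induction cs generalizing s acc with
  | nil => simp [PySem.List.enumerate_nil, pvPluses]
  | cons c rest ih =>
    rw [PySem.List.enumerate_cons]
    simp only [List.foldl_cons, pvPluses]
    by_cases hc : c = '+'
    · simp [hc, ih, List.append_assoc]
    · simp [hc, ih]

theorem pvMap_range_eq_pairs (P : List Int) :
    (List.range (P.length - 1)).map
      (fun k => (P.getD k 0 + 1, P.getD (k + 1) 0)) = pvPairs P := by
  induction P with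
  | nil => simp [pvPairs]
  | cons x rest ih =>
    match rest with
    | [] => simp [pvPairs]
    | y :: rest' =>
      have hlen : (x :: y :: rest').length - 1 = (y :: rest').length - 1 + 1 := by
        simp
      rw [hlen, List.range_succ_eq_map, List.map_cons, List.map_map]
      simp only [pvPairs]
      congr 1

theorem pvRangeFold_eq_pairs (P : List Int) :
    (PySem.List.pyRange 0 ((P.length : Int) - 1) 1).foldl
      (fun boundaries i =>
        boundaries ++ [(PySem.List.pyGetD P i 0 + 1, PySem.List.pyGetD P (i + 1) 0)]) [] =
      pvPairs P := by
  rw [PySem.List.pyRange_one, List.foldl_map]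
  have h1 : ((P.length : Int) - 1 - 0).toNat = P.length - 1 := by omega
  rw [h1]
  have hfun : ∀ (b : List (Int × Int)) (k : Nat),
      b ++ [(PySem.List.pyGetD P ((0 : Int) + (k : Int)) 0 + 1,
             PySem.List.pyGetD P ((0 : Int) + (k : Int) + 1) 0)]
        = b ++ [(P.getD k 0 + 1, P.getD (k + 1) 0)] := by
    intro b k
    have h0 : (0 : Int) + (k : Int) = ((k : Nat) : Int) := by ring
    have hk : ((k : Int)) + 1 = ((k + 1 : Nat) : Int) := by push_cast; ring
    rw [h0, hk, PySem.List.pyGetD_natCast, PySem.List.pyGetD_natCast]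
  simp only [hfun]
  rw [PySem.List.foldl_append_singleton_eq_map, List.nil_append, pvMap_range_eq_pairs]

-- ===== VERDICT (by name: the statement is the Claim_ definition above) =====
theorem detect_column_boundaries_py_spec : Claim_equal_detect_column_boundaries_py := by
  intro s _
  unfold Spec_detect_column_boundaries_py detect_column_boundaries_py detect_column_boundaries_py_alt
  rw [pvAltGo_eq s.toList 0 (-1) [] (by omega)]
  simp only [show ¬ (0 : Int) ≤ -1 by omega, if_false, List.nil_append]
  rw [pvCollect_eq s.toList 0 [], List.nil_append, pvRangeFold_eq_pairs]
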